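-- pv_equiv track=rewrite | github.com/larryjanpierrmurcialozano/proyecto-de-grado | backend/instalador_imports.py | _parse_requirement_detail
-- ===== SOURCE A (Python) =====
-- def _parse_requirement_detail(line: str) -> tuple[str | None, str | None]:
--     raw = line.strip()
--     if not raw or raw.startswith('#'):
--         return None, None
--     if raw.startswith('-r') or raw.startswith('--'):
--         return None, None
--
--     raw = raw.split('#', 1)[0].strip()
--     raw = raw.split(';', 1)[0].strip()
--     if not raw:
--         return None, None
--
--     if ' @ ' in raw:
--         name = raw.split(' @ ', 1)[0].strip()
--         if '[' in name:
--             name = name.split('[', 1)[0].strip()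
--         return name or None, None
--
--     ops = ('===', '==', '>=', '<=', '~=', '!=', '>', '<')
--     op_index = None
--     op_used = None
--     for op in ops:
--         idx = raw.find(op)
--         if idx != -1 and (op_index is None or idx < op_index):
--             op_index = idx
--             op_used = op
--
--     if op_index is None:
--         name = raw
--         if '[' in name:
--             name = name.split('[', 1)[0].strip()
--         return name or None, None
--
--     name = raw[:op_index].strip()
--     spec = raw[op_index + len(op_used):].strip()
--     if '[' in name:
--         name = name.split('[', 1)[0].strip()
--     if not name:
--         return None, None
--     return name, f"{op_used}{spec}" if spec else None
-- ===== SOURCE B (Python) =====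
-- OPS = ('===', '==', '>=', '<=', '~=', '!=', '>', '<')
--
--
-- def _find_operator(raw):
--     # single left-to-right scan: the first position where any operator starts
--     # wins, and at that position the longest matching operator is taken
--     for i in range(len(raw)):
--         for op in OPS:
--             if raw.startswith(op, i):
--                 return i, op
--     return None, None
--
--
-- def _clean_name(name):
--     if '[' in name:
--         name = name.split('[', 1)[0].strip()
--     return name or None
--
--
-- def _parse_requirement_detail(line):
--     raw = line.strip()
--     if not raw or raw.startswith(('#', '-r', '--')):
--         return None, None
--     raw = raw.split('#', 1)[0].strip()
--     raw = raw.split(';', 1)[0].strip()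
--     if not raw:
--         return None, None
--     if ' @ ' in raw:
--         return _clean_name(raw.split(' @ ', 1)[0].strip()), None
--     i, op = _find_operator(raw)
--     if op is None:
--         return _clean_name(raw), None
--     name = _clean_name(raw[:i].strip())
--     if name is None:
--         return None, None
--     spec = raw[i + len(op):].strip()
--     return name, op + spec if spec else None
-- ===== Notes on version B (the rewrite author's own statement) =====
-- stated objective: alternative
-- what changed: A finds the version operator with eight full str.find passes (one per operator) while keeping a running minimum index; B makes a single left-to-right scan over the cleaned string and stops at the first position where any operator starts, taking the longest operator matching there.
import Mathlib
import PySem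

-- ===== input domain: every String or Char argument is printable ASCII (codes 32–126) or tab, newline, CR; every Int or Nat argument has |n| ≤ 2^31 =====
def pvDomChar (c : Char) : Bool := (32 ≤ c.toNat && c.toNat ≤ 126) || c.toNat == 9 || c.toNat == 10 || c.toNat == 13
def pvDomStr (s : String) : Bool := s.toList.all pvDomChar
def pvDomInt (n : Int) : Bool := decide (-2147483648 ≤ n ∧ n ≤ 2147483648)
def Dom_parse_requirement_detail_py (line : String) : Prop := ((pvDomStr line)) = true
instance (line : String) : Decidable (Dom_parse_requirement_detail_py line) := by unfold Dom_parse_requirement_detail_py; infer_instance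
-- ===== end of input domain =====

-- B replaces A's eight full `str.find` passes plus a running-minimum accumulator by a single
-- left-to-right scan that stops at the first position where any operator starts (alternative;
-- same behaviour, different algorithm).

-- ===== PORT A =====
-- the operator tuple, in A's order
def pvOps : List (List Char) :=
  [['=','=','='], ['=','='], ['>','='], ['<','='], ['~','='], ['!','='], ['>'], ['<']]

-- s.split(sep, 1)[0] for a nonempty sep (splitMax? is none only for sep = "")
def pvSplit1Head (s sep : List Char) : List Char :=
  match PySem.Chars.splitMax? s sep 1 with
  | some (h :: _) => h
  | _ => s

-- one step of A's loop body: idx = raw.find(op); if idx != -1 and (op_index is None or idx < op_index): …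
def pvStepA (raw : List Char) (st : Option (Int × List Char)) (op : List Char) :
    Option (Int × List Char) :=
  let idx := PySem.Chars.find raw op
  if idx = -1 then st
  else
    match st with
    | none => some (idx, op)
    | some (i, _) => if idx < i then some (idx, op) else st

-- A's search: for op in ops: … keeping (op_index, op_used) as one optional pair
def pvFindOpA (raw : List Char) : Option (Int × List Char) :=
  pvOps.foldl (pvStepA raw) none

def pvParseA (line : List Char) : Option (List Char) × Option (List Char) :=
  let raw := PySem.Chars.strip line
  if raw = [] || PySem.Chars.startswith raw ['#'] then (none, none)
  else if PySem.Chars.startswith raw ['-','r'] || PySem.Chars.startswith raw ['-','-'] then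
    (none, none)
  else
    let raw := PySem.Chars.strip (pvSplit1Head raw ['#'])
    let raw := PySem.Chars.strip (pvSplit1Head raw [';'])
    if raw = [] then (none, none)
    else if PySem.Chars.isIn [' ','@',' '] raw then
      let name := PySem.Chars.strip (pvSplit1Head raw [' ','@',' '])
      let name := if PySem.Chars.isIn ['['] name then PySem.Chars.strip (pvSplit1Head name ['[']) else name
      (if name = [] then none else some name, none)
    else
      match pvFindOpA raw with
      | none =>
        let name := raw
        let name := if PySem.Chars.isIn ['['] name then PySem.Chars.strip (pvSplit1Head name ['[']) else name
        (if name = [] then none else some name, none)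
      | some (idx, op) =>
        let name := PySem.Chars.strip (PySem.Chars.slice raw none (some idx))
        let spec := PySem.Chars.strip (PySem.Chars.slice raw (some (idx + op.length)) none)
        let name := if PySem.Chars.isIn ['['] name then PySem.Chars.strip (pvSplit1Head name ['[']) else name
        if name = [] then (none, none)
        else (some name, if spec = [] then none else some (op ++ spec))

def parse_requirement_detail_py (line : String) : Option String × Option String :=
  ((pvParseA line.toList).1.map (fun cs => String.ofList cs),
   (pvParseA line.toList).2.map (fun cs => String.ofList cs))

-- ===== PORT B =====
-- _clean_name: strip a '[extras]' suffix, then `name or None`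
def pvCleanB (name : List Char) : Option (List Char) :=
  let name := if PySem.Chars.isIn ['['] name then PySem.Chars.strip (pvSplit1Head name ['[']) else name
  if name = [] then none else some name

-- _find_operator: one scan; at position i the first (= longest) operator starting there wins
def pvScanB : List Char → Int → Option (Int × List Char)
  | [], _ => none
  | c :: rest, i =>
    match pvOps.find? (fun op => PySem.Chars.startswith (c :: rest) op) with
    | some op => some (i, op)
    | none => pvScanB rest (i + 1)

def pvParseB (line : List Char) : Option (List Char) × Option (List Char) :=
  let raw := PySem.Chars.strip line
  if raw = [] || (PySem.Chars.startswith raw ['#'] ||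
      PySem.Chars.startswith raw ['-','r'] || PySem.Chars.startswith raw ['-','-']) then
    (none, none)
  else
    let raw := PySem.Chars.strip (pvSplit1Head raw ['#'])
    let raw := PySem.Chars.strip (pvSplit1Head raw [';'])
    if raw = [] then (none, none)
    else if PySem.Chars.isIn [' ','@',' '] raw then
      (pvCleanB (PySem.Chars.strip (pvSplit1Head raw [' ','@',' '])), none)
    else
      match pvScanB raw 0 with
      | none => (pvCleanB raw, none)
      | some (i, op) =>
        match pvCleanB (PySem.Chars.strip (PySem.Chars.slice raw none (some i))) with
        | none => (none, none)
        | some name =>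
          let spec := PySem.Chars.strip (PySem.Chars.slice raw (some (i + op.length)) none)
          (some name, if spec = [] then none else some (op ++ spec))

def parse_requirement_detail_py_alt (line : String) : Option String × Option String :=
  ((pvParseB line.toList).1.map (fun cs => String.ofList cs),
   (pvParseB line.toList).2.map (fun cs => String.ofList cs))

-- ===== PRECONDITION & SPEC =====
def Spec_parse_requirement_detail_py (line : String) (out : Option String × Option String) : Prop := out = parse_requirement_detail_py_alt line
instance (line : String) (out : Option String × Option String) : Decidable (Spec_parse_requirement_detail_py line out) := by unfold Spec_parse_requirement_detail_py; infer_instance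

-- ===== CLAIM (what is proved, stated in full; the proofs are below) =====
def Claim_equal_parse_requirement_detail_py : Prop := ∀ (line : String), Dom_parse_requirement_detail_py line → Spec_parse_requirement_detail_py line (parse_requirement_detail_py line)

-- ===== LEMMAS AND PROOFS =====

-- find points at position k as soon as op matches at k and nowhere earlier
theorem pv_find_eq_of_first (cs op : List Char) (k : Nat)
    (h1 : op <+: cs.drop k) (h2 : ∀ i < k, ¬ op <+: cs.drop i) :
    PySem.Chars.find cs op = (k : Int) := by
  have hinf : op <:+: cs := h1.isInfix.trans (List.drop_suffix k cs).isInfix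
  have h0 : 0 ≤ PySem.Chars.find cs op := (PySem.Chars.find_nonneg_iff _ _).2 hinf
  obtain ⟨hp, hmin⟩ := PySem.Chars.find_spec h0
  rcases lt_trichotomy (PySem.Chars.find cs op).toNat k with h | h | h
  · exact absurd hp (h2 _ h)
  · omega
  · exact absurd h1 (hmin k h)

theorem pv_prefix_of_find_eq_zero (cs op : List Char)
    (h : PySem.Chars.find cs op = 0) : op <+: cs := by
  have h0 : 0 ≤ PySem.Chars.find cs op := by omega
  have := (PySem.Chars.find_spec h0).1
  simpa [h] using this

-- raw.find(op) on a cons, when op does not start at position 0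
theorem pv_find_cons_shift (c : Char) (rest op : List Char) (h : ¬ op <+: (c :: rest)) :
    PySem.Chars.find (c :: rest) op =
      if PySem.Chars.find rest op = -1 then -1 else PySem.Chars.find rest op + 1 := by
  by_cases hr : PySem.Chars.find rest op = -1
  · rw [if_pos hr, PySem.Chars.find_eq_neg_one_iff]
    rw [PySem.Chars.find_eq_neg_one_iff] at hr
    intro hinf
    rcases List.infix_cons_iff.1 hinf with hpre | hinf'
    · exact h hpre
    · exact hr hinf'
  · rw [if_neg hr]
    have h0 : 0 ≤ PySem.Chars.find rest op := by
      have := PySem.Chars.neg_one_le_find rest op; omega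
    obtain ⟨hp, hmin⟩ := PySem.Chars.find_spec h0
    have := pv_find_eq_of_first (c :: rest) op ((PySem.Chars.find rest op).toNat + 1)
      (by simpa [List.drop_succ_cons] using hp)
      (by
        intro i hi
        cases i with
        | zero => simpa using h
        | succ j =>
          simp only [List.drop_succ_cons]
          exact hmin j (by omega))
    rw [this]
    push_cast
    rw [Int.toNat_of_nonneg h0]

def pvShift (st : Option (Int × List Char)) : Option (Int × List Char) :=
  st.map (fun p => (p.1 + 1, p.2))

-- once the state holds index 0, A's loop never changes it (indices are ≥ 0 when found)
theorem pv_foldl_keep_zero (cs w : List Char) (l : List (List Char)) :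
    l.foldl (pvStepA cs) (some (0, w)) = some (0, w) := by
  induction l with
  | nil => rfl
  | cons op l ih =>
    have hge := PySem.Chars.neg_one_le_find cs op
    simp only [List.foldl_cons]
    have : pvStepA cs (some (0, w)) op = some (0, w) := by
      unfold pvStepA
      by_cases hidx : PySem.Chars.find cs op = -1
      · simp [hidx]
      · simp only [hidx]
        have : ¬ PySem.Chars.find cs op < 0 := by omega
        simp [this]
    rw [this, ih]

-- while no processed op is a prefix of cs, the stored index (if any) stays positive
theorem pv_foldl_pre (cs : List Char) (l : List (List Char))
    (h : ∀ op ∈ l, ¬ op <+: cs) (st : Option (Int × List Char))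
    (hst : st = none ∨ ∃ i o, st = some (i, o) ∧ 0 < i) :
    l.foldl (pvStepA cs) st = none ∨
      ∃ i o, l.foldl (pvStepA cs) st = some (i, o) ∧ 0 < i := by
  induction l generalizing st with
  | nil => simpa using hst
  | cons op l ih =>
    simp only [List.foldl_cons]
    apply ih (fun o ho => h o (List.mem_cons_of_mem _ ho))
    have hnp : ¬ op <+: cs := h op List.mem_cons_self
    have hge := PySem.Chars.neg_one_le_find cs op
    have hne0 : PySem.Chars.find cs op ≠ 0 := fun h0 => hnp (pv_prefix_of_find_eq_zero cs op h0)
    unfold pvStepA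
    by_cases hidx : PySem.Chars.find cs op = -1
    · simp only [hidx]; exact hst
    · simp only [hidx]
      rcases hst with rfl | ⟨i, o, rfl, hi⟩
      · exact Or.inr ⟨_, _, rfl, by omega⟩
      · by_cases hlt : PySem.Chars.find cs op < i
        · simp only [hlt]; exact Or.inr ⟨_, _, rfl, by omega⟩
        · simp only [hlt]; exact Or.inr ⟨i, o, rfl, hi⟩

-- if w is the first op (in tuple order) that is a prefix of cs, A's loop returns (0, w)
theorem pv_findA_first (cs : List Char) (pre : List (List Char)) (w : List Char) (post : List (List Char))
    (hops : pvOps = pre ++ w :: post)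
    (hpre : ∀ op ∈ pre, ¬ op <+: cs) (hw : w <+: cs) :
    pvFindOpA cs = some (0, w) := by
  unfold pvFindOpA
  rw [hops, List.foldl_append, List.foldl_cons]
  have hst := pv_foldl_pre cs pre hpre none (Or.inl rfl)
  have hfw : PySem.Chars.find cs w = 0 := pv_find_eq_of_first cs w 0 (by simpa using hw) (by omega)
  have hstep : pvStepA cs (pre.foldl (pvStepA cs) none) w = some (0, w) := by
    rcases hst with hn | ⟨i, o, hs, hi⟩
    · rw [hn]; norm_num [pvStepA, hfw]
    · rw [hs]; norm_num [pvStepA, hfw, hi]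
  rw [hstep, pv_foldl_keep_zero]

-- shifting the state by one commutes with A's loop over a shifted string
theorem pv_foldl_shift (c : Char) (rest : List Char) (l : List (List Char))
    (h : ∀ op ∈ l, ¬ op <+: (c :: rest)) (st : Option (Int × List Char)) :
    l.foldl (pvStepA (c :: rest)) (pvShift st) = pvShift (l.foldl (pvStepA rest) st) := by
  induction l generalizing st with
  | nil => rfl
  | cons op l ih =>
    simp only [List.foldl_cons]
    rw [← ih (fun o ho => h o (List.mem_cons_of_mem _ ho))]
    congr 1
    have hnp : ¬ op <+: (c :: rest) := h op List.mem_cons_self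
    have hshift := pv_find_cons_shift c rest op hnp
    have hge := PySem.Chars.neg_one_le_find rest op
    unfold pvStepA
    by_cases hr : PySem.Chars.find rest op = -1
    · simp [hshift, hr]
    · simp only [hshift, if_neg hr]
      have hne : PySem.Chars.find rest op + 1 ≠ -1 := by omega
      simp only [hne]
      rcases st with _ | ⟨i, o⟩
      · simp [pvShift]
      · simp only [pvShift, Option.map_some]
        by_cases hlt : PySem.Chars.find rest op < i
        · have : PySem.Chars.find rest op + 1 < i + 1 := by omega
          simp [hlt, this]
        · have : ¬ PySem.Chars.find rest op + 1 < i + 1 := by omega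
          simp [hlt, this]

theorem pv_scan_shift (cs : List Char) (i : Int) :
    pvScanB cs (i + 1) = pvShift (pvScanB cs i) := by
  induction cs generalizing i with
  | nil => rfl
  | cons c rest ih =>
    unfold pvScanB
    cases hf : pvOps.find? (fun op => PySem.Chars.startswith (c :: rest) op) with
    | some w => simp [pvShift]
    | none => simpa using ih (i + 1)

-- the core: A's eight-pass minimum search equals B's single scan
theorem pv_findA_eq_scanB (cs : List Char) : pvFindOpA cs = pvScanB cs 0 := by
  induction cs with
  | nil => decide
  | cons c rest ih =>
    cases hf : pvOps.find? (fun op => PySem.Chars.startswith (c :: rest) op) with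
    | some w =>
      obtain ⟨pre, post, hops, hpre, hw⟩ :
          ∃ pre post, pvOps = pre ++ w :: post ∧
            (∀ op ∈ pre, ¬ op <+: (c :: rest)) ∧ w <+: (c :: rest) := by
        obtain ⟨hpw, pre, post, hsplit, hprev⟩ := List.find?_eq_some_iff_append.1 hf
        exact ⟨pre, post, hsplit,
          fun op hop hcontra => by
            have h := hprev op hop
            rw [(PySem.Chars.startswith_iff _ _).2 hcontra] at h
            simp at h,
          (PySem.Chars.startswith_iff _ _).1 hpw⟩
      rw [pv_findA_first (c :: rest) pre w post hops hpre hw]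
      unfold pvScanB; rw [hf]
    | none =>
      have hall : ∀ op ∈ pvOps, ¬ op <+: (c :: rest) := by
        intro op hop hcontra
        have h := List.find?_eq_none.1 hf op hop
        rw [(PySem.Chars.startswith_iff _ _).2 hcontra] at h
        simp at h
      have : pvFindOpA (c :: rest) = pvShift (pvFindOpA rest) := by
        unfold pvFindOpA
        have := pv_foldl_shift c rest pvOps hall none
        simpa [pvShift] using this
      rw [this, ih, ← pv_scan_shift]
      conv_rhs => unfold pvScanB
      rw [hf]

theorem pv_parse_eq (cs : List Char) : pvParseA cs = pvParseB cs := by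
  unfold pvParseA pvParseB pvCleanB
  by_cases hA : PySem.Chars.strip cs = []
  · simp [hA]
  by_cases hB : PySem.Chars.startswith (PySem.Chars.strip cs) ['#'] = true
  · simp [hA, hB]
  by_cases hC : PySem.Chars.startswith (PySem.Chars.strip cs) ['-','r'] = true
  · simp [hA, hB, hC]
  by_cases hD : PySem.Chars.startswith (PySem.Chars.strip cs) ['-','-'] = true
  · simp [hA, hB, hC, hD]
  simp only [hA, hB, hC, hD, Bool.not_eq_true] at *
  simp only [decide_false, Bool.or_false, Bool.false_eq_true, if_false]
  split
  · rfl
  split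
  · rfl
  rw [pv_findA_eq_scanB]
  cases pvScanB (PySem.Chars.strip (pvSplit1Head (PySem.Chars.strip
      (pvSplit1Head (PySem.Chars.strip cs) ['#'])) [';'])) 0 with
  | none => rfl
  | some p =>
    obtain ⟨i, op⟩ := p
    simp only
    split_ifs <;> rfl

-- ===== VERDICT (by name: the statement is the Claim_ definition above) =====
theorem parse_requirement_detail_py_spec : Claim_equal_parse_requirement_detail_py := by
  intro line _
  unfold Spec_parse_requirement_detail_py parse_requirement_detail_py parse_requirement_detail_py_alt
  rw [pv_parse_eq]
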